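-- pv_equiv track=rewrite | github.com/mrmagicbg/ojs-bg-edu | scripts/sync_structure.py | get_top_block
-- ===== SOURCE A (Python) =====
-- def get_top_block(lines):
--     # return list of lines that are the top consecutive block starting with '>'
--     out = []
--     for ln in lines:
--         if ln.lstrip().startswith('>'):
--             out.append(ln)
--         elif not ln.strip():
--             # If blank line after top block, include it and stop
--             if out:
--                 out.append(ln)
--                 break
--             else:
--                 # skip leading blank lines
--                 continue
--         else:
--             break
--     return out
-- ===== SOURCE B (Python) =====
-- def get_top_block(lines):
--     # Compute boundary indices first, then return a single slice:
--     # k = end of leading blank run, m = end of quote run, e = m (+1 for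
--     # one trailing blank line when the quote block is non-empty).
--     lines = list(lines)
--
--     def scan(p, i):
--         while i < len(lines) and p(lines[i]):
--             i += 1
--         return i
--
--     k = scan(lambda l: not l.strip(), 0)
--     m = scan(lambda l: l.lstrip().startswith('>'), k)
--     e = m + 1 if k < m and m < len(lines) and not lines[m].strip() else m
--     return lines[k:e]
-- ===== Notes on version B (the rewrite author's own statement) =====
-- stated objective: alternative
-- what changed: B does no accumulator loop at all: it computes two boundary indices (end of the leading blank run, end of the quote run) by index scans, decides arithmetically whether one trailing blank is included, and returns a single slice lines[k:e].
import Mathlib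
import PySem

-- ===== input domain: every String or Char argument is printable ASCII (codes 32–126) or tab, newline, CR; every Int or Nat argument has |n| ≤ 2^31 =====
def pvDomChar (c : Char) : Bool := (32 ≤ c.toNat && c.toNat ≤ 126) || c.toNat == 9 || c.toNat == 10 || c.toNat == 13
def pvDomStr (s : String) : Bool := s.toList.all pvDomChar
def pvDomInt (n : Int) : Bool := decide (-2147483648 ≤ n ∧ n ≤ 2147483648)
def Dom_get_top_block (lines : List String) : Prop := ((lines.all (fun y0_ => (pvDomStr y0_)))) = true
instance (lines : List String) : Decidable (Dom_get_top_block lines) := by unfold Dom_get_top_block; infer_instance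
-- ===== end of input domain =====

-- B replaces A's accumulator loop by boundary-index scans and one slice (objective: alternative).

-- line classifiers shared by both ports (each is a direct port of the Python test)
def pvBlank (l : String) : Bool := PySem.Str.strip l = ""         -- not l.strip()
def pvQuote (l : String) : Bool := PySem.Str.startswith (PySem.Str.lstrip l) ">"  -- l.lstrip().startswith('>')

-- ===== PORT A =====
-- A's for-loop with accumulator `out` and break, step for step.
def goA_get_top_block (out : List String) : List String → List String
  | [] => out
  | ln :: rest =>
    if pvQuote ln then
      goA_get_top_block (out ++ [ln]) rest
    else if pvBlank ln then
      (if out.isEmpty then goA_get_top_block out rest else out ++ [ln])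
    else out

def get_top_block (lines : List String) : List String :=
  goA_get_top_block [] lines

-- ===== PORT B =====
-- B's index scan: while i < len(lines) and p(lines[i]): i += 1
def pvScan (p : String → Bool) (lines : List String) (i : Nat) : Nat :=
  if h : i < lines.length then
    (if p lines[i] then pvScan p lines (i + 1) else i)
  else i
termination_by lines.length - i
decreasing_by omega

def get_top_block_alt (lines : List String) : List String :=
  let k := pvScan pvBlank lines 0
  let m := pvScan pvQuote lines k
  let e := if k < m ∧ lines[m]?.any pvBlank = true then m + 1 else m
  PySem.List.slice lines (some (k : Int)) (some (e : Int))

-- ===== PRECONDITION & SPEC =====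
def Spec_get_top_block (lines : List String) (out : List String) : Prop := out = get_top_block_alt lines
instance (lines : List String) (out : List String) : Decidable (Spec_get_top_block lines out) := by unfold Spec_get_top_block; infer_instance

-- ===== CLAIM =====
def Claim_equal_get_top_block : Prop := ∀ (lines : List String), Dom_get_top_block lines → Spec_get_top_block lines (get_top_block lines)

-- ===== LEMMAS AND PROOFS =====

-- proof-side middle form shared by both directions: collect after dropping leading blanks
def pvCollect : List String → List String
  | [] => []
  | ln :: rest =>
    if pvQuote ln then ln :: pvCollect rest
    else if pvBlank ln then [ln]
    else []

-- head of a dropWhile result does not satisfy the predicate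
theorem pv_head_dropWhile {α : Type} (p : α → Bool) (l : List α) (b : α)
    (h : (l.dropWhile p).head? = some b) : p b = false := by
  induction l with
  | nil => simp [List.dropWhile] at h
  | cons a t ih =>
    rw [List.dropWhile_cons] at h
    by_cases ha : p a = true
    · simp [ha] at h; exact ih h
    · simp [ha] at h
      rw [h] at ha
      exact (Bool.not_eq_true _).mp ha

theorem pv_dw_head_false (l : List Char) (c : Char) (t : List Char)
    (h : l.dropWhile PySem.Chars.isspace = c :: t) : PySem.Chars.isspace c = false := by
  apply pv_head_dropWhile PySem.Chars.isspace l
  rw [h]; rfl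

-- a blank line cannot start, after lstrip, with '>'
theorem pv_blank_not_quote (s : String) (hb : pvBlank s = true) : pvQuote s = false := by
  have hb' : PySem.Str.strip s = "" := by simpa [pvBlank] using hb
  have hl : PySem.Chars.strip s.toList = [] := by
    have := congrArg String.toList hb'
    simpa [PySem.Str.strip] using this
  unfold PySem.Chars.strip PySem.Chars.lstrip at hl
  cases hd : s.toList.dropWhile PySem.Chars.isspace with
  | nil =>
      simp [pvQuote, PySem.Str.startswith, PySem.Str.lstrip, PySem.Chars.lstrip, hd,
        PySem.Chars.startswith]
  | cons c t =>
      exfalso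
      have hc : PySem.Chars.isspace c = false := pv_dw_head_false _ _ _ hd
      rw [hd] at hl
      unfold PySem.Chars.rstrip at hl
      have hall : ∀ x ∈ (c :: t).reverse, PySem.Chars.isspace x = true := by
        have : (c :: t).reverse.dropWhile PySem.Chars.isspace = [] := by
          simpa using congrArg List.reverse hl
        simpa [List.dropWhile_eq_nil_iff] using this
      have := hall c (by simp)
      simp [this] at hc

-- ===== A-side: A equals pvCollect after dropping leading blanks =====
theorem pv_goA_nonempty (rest : List String) : ∀ out : List String, out ≠ [] →
    goA_get_top_block out rest = out ++ pvCollect rest := by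
  induction rest with
  | nil => intro out _; simp [goA_get_top_block, pvCollect]
  | cons ln rest ih =>
    intro out hout
    by_cases hq : pvQuote ln = true
    · rw [goA_get_top_block, if_pos hq, pvCollect, if_pos hq,
        ih (out ++ [ln]) (by simp)]
      simp
    · by_cases hbl : pvBlank ln = true
      · rw [goA_get_top_block, if_neg hq, if_pos hbl,
          if_neg (by simpa [List.isEmpty_iff] using hout),
          pvCollect, if_neg hq, if_pos hbl]
      · rw [goA_get_top_block, if_neg hq, if_neg hbl,
          pvCollect, if_neg hq, if_neg hbl]
        simp

theorem pv_A_eq_collect (lines : List String) :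
    get_top_block lines = pvCollect (lines.dropWhile pvBlank) := by
  unfold get_top_block
  induction lines with
  | nil => simp [goA_get_top_block, pvCollect]
  | cons ln rest ih =>
    by_cases hq : pvQuote ln = true
    · have hbl : ¬ pvBlank ln = true := by
        intro hb
        rw [pv_blank_not_quote ln hb] at hq
        exact Bool.false_ne_true hq
      rw [goA_get_top_block, if_pos hq]
      simp only [List.nil_append]
      rw [pv_goA_nonempty rest [ln] (by simp),
        List.dropWhile_cons, if_neg hbl, pvCollect, if_pos hq]
      simp
    · by_cases hbl : pvBlank ln = true
      · rw [goA_get_top_block, if_neg hq, if_pos hbl]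
        simp only [List.isEmpty_nil, if_true]
        rw [List.dropWhile_cons, if_pos hbl]
        exact ih
      · rw [goA_get_top_block, if_neg hq, if_neg hbl,
          List.dropWhile_cons, if_neg hbl, pvCollect, if_neg hq, if_neg hbl]

-- ===== B-side lemmas =====
-- pvScan computes i + length of the takeWhile run of the suffix
theorem pv_scan_eq (p : String → Bool) (lines : List String) (i : Nat) :
    pvScan p lines i = i + ((lines.drop i).takeWhile p).length := by
  fun_induction pvScan p lines i with
  | case1 i h hp ih =>
    have hd : lines.drop i = lines[i] :: lines.drop (i + 1) :=
      List.drop_eq_getElem_cons h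
    rw [ih, hd, List.takeWhile_cons, if_pos hp]
    simp
    omega
  | case2 i h hp =>
    have hp' : p lines[i] = false := (Bool.not_eq_true _).mp hp
    have hd : lines.drop i = lines[i] :: lines.drop (i + 1) :=
      List.drop_eq_getElem_cons h
    rw [hd, List.takeWhile_cons, if_neg (by simp [hp'])]
    simp
  | case3 i h =>
    rw [List.drop_eq_nil_of_le (by omega)]
    simp

-- unconditional characterisation of pvCollect as takeWhile + optional trailing blank
theorem pv_collect_gen (rest : List String) :
    pvCollect rest = rest.takeWhile pvQuote ++
      (match (rest.dropWhile pvQuote).head? with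
       | some b => if pvBlank b then [b] else []
       | none => []) := by
  induction rest with
  | nil => simp [pvCollect]
  | cons ln t ih =>
    by_cases hq : pvQuote ln = true
    · rw [pvCollect, if_pos hq, List.takeWhile_cons, if_pos hq,
        List.dropWhile_cons, if_pos hq, ih]
      simp
    · rw [pvCollect, if_neg hq, List.takeWhile_cons, if_neg hq,
        List.dropWhile_cons, if_neg hq]
      by_cases hbl : pvBlank ln = true
      · simp [hbl]
      · simp [hbl]

-- ===== VERDICT =====
theorem get_top_block_spec : Claim_equal_get_top_block := by
  intro lines _
  unfold Spec_get_top_block get_top_block_alt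
  simp only []
  set rest := lines.dropWhile pvBlank with hrest
  set q1 := lines.takeWhile pvBlank with hq1
  set q2 := rest.takeWhile pvQuote with hq2
  set r2 := rest.dropWhile pvQuote with hr2
  have hsplit1 : lines = q1 ++ rest := (List.takeWhile_append_dropWhile ..).symm
  have hsplit2 : rest = q2 ++ r2 := (List.takeWhile_append_dropWhile ..).symm
  have hk : pvScan pvBlank lines 0 = q1.length := by
    rw [pv_scan_eq]; simp [hq1]
  have hdropk : lines.drop q1.length = rest := by
    conv_lhs => rw [hsplit1]
    exact List.drop_left
  have hm : pvScan pvQuote lines q1.length = q1.length + q2.length := by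
    rw [pv_scan_eq, hdropk]
  have hdropm : lines.drop (q1.length + q2.length) = r2 := by
    conv_lhs => rw [hsplit1, hsplit2, ← List.append_assoc]
    have : (q1 ++ q2).length = q1.length + q2.length := by simp
    rw [← this]
    exact List.drop_left
  have hgetm : lines[q1.length + q2.length]? = r2.head? := by
    rw [← List.head?_drop, hdropm]
  rw [hk, hm, hgetm]
  rw [pv_A_eq_collect, ← hrest, pv_collect_gen, ← hq2, ← hr2]
  rcases hhead : r2.head? with _ | b
  · -- r2 empty: no trailing candidate
    have hr2nil : r2 = [] := List.head?_eq_none_iff.mp hhead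
    rw [if_neg (by simp), PySem.List.slice_natCast, hdropk]
    simp only [Nat.add_sub_cancel_left]
    conv_rhs => rw [hsplit2, hr2nil]
    simp
  · by_cases hbl : pvBlank b = true
    · -- trailing blank exists
      have hq2ne : q2 ≠ [] := by
        intro hnil
        have : rest.head? = some b := by
          rw [hsplit2, hnil]; simpa using hhead
        have hbq : pvBlank b = false := pv_head_dropWhile pvBlank lines b this
        rw [hbq] at hbl; exact Bool.false_ne_true hbl
      have hpos : 0 < q2.length := List.length_pos_iff.mpr hq2ne
      rw [if_pos ⟨by omega, by simp [hbl]⟩, PySem.List.slice_natCast, hdropk]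
      have heq : q1.length + q2.length + 1 - q1.length = q2.length + 1 := by omega
      rw [heq]
      simp only [hbl, if_true]
      conv_rhs => rw [hsplit2]
      rw [List.take_append]
      obtain ⟨t, ht⟩ := List.head?_eq_some_iff.mp hhead
      have h1 : List.take (q2.length + 1) q2 = q2 := List.take_of_length_le (by omega)
      have h2 : q2.length + 1 - q2.length = 1 := by omega
      rw [ht, h1, h2]
      simp
    · -- trailing line is not blank
      rw [if_neg (by simp [hbl]), PySem.List.slice_natCast, hdropk]
      simp only [Nat.add_sub_cancel_left]
      simp only [Bool.not_eq_true] at hbl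
      simp only [hbl]
      conv_rhs => rw [hsplit2]
      simp
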